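-- pv_equiv track=rewrite | github.com/olDox0/Doxoade | doxoade/tools/vulcan/lib_optimizer.py | _gen_name
-- ===== SOURCE A (Python) =====
-- def _gen_name(n: int) -> str:
--     """
--     Gera nomes curtos com prefixo underscore:
--       0 → _a, 1 → _b, ..., 25 → _z, 26 → _aa, 27 → _ab, ...
--     O underscore evita conflito com builtins de letra única (e, f, i…).
--     """
--     chars = 'abcdefghijklmnopqrstuvwxyz'
--     result = ''
--     n += 1
--     while n > 0:
--         n -= 1
--         result = chars[n % 26] + result
--         n //= 26
--     return f'_{result}'
-- ===== SOURCE B (Python) =====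
-- def _gen_name(n: int) -> str:
--     """Length-first naming: find the name length L by subtracting block sizes,
--     then emit the offset within that block in plain fixed-width base 26."""
--     chars = 'abcdefghijklmnopqrstuvwxyz'
--     m = n + 1
--     if m <= 0:
--         return '_'
--     L, total = 1, 26
--     while m > total:
--         L += 1
--         total += 26 ** L
--     idx = m - (total - 26 ** L) - 1
--     out = []
--     for _ in range(L):
--         out.append(chars[idx % 26])
--         idx //= 26
--     return '_' + ''.join(reversed(out))
-- ===== Notes on version B (the rewrite author's own statement) =====
-- stated objective: alternative
-- what changed: Instead of the bijective base-26 digit loop that prepends characters while repeatedly decrementing and dividing, B first determines the name length L by subtracting geometric block sizes (26, 26^2, ...) and then emits the offset within that block as a plain fixed-width base-26 numeral, reversing the collected digits at the end.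
import Mathlib
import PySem

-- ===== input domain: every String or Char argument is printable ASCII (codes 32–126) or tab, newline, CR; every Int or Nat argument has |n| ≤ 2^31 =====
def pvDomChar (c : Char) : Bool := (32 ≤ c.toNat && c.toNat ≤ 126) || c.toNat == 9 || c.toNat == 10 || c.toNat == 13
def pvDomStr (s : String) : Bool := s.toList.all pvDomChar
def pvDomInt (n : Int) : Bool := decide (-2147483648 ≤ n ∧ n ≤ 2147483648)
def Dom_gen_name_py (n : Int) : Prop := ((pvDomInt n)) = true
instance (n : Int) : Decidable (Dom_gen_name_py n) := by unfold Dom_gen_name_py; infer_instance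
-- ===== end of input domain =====

-- B replaces A's bijective digit loop (decrement, prepend, divide) by a length-first
-- algorithm: find the name length L via geometric block sizes, then emit a plain
-- fixed-width base-26 numeral and reverse it (objective: alternative, same cost).

-- ===== PORT A =====
-- A's while-loop as structural recursion on the loop state (n, result).
-- chars[m % 26] is always in range (0 ≤ m % 26 < 26), so the .getD default is unreachable.
def genNameLoop (n : Int) (result : String) : String :=
  if 0 < n then
    let m := n - 1
    genNameLoop (PySem.Int.floordiv m 26)
      (((PySem.Str.pyGet? "abcdefghijklmnopqrstuvwxyz" (PySem.Int.mod m 26)).getD 'a').toString ++ result)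
  else result
termination_by n.toNat
decreasing_by
  simp only [PySem.Int.floordiv_eq_ediv_of_pos (by omega : (0:Int) < 26)]
  omega

def gen_name_py (n : Int) : String := "_" ++ genNameLoop (n + 1) ""

-- ===== PORT B =====
-- B's length-finding loop: `while m > total: L += 1; total += 26 ** L`.
def findLen (m : Int) (L : Nat) (total : Int) : Nat × Int :=
  if total < m then findLen m (L + 1) (total + 26 ^ (L + 1)) else (L, total)
termination_by (m - total).toNat
decreasing_by
  have h : (0:Int) < 26 ^ (L + 1) := by positivity
  omega

-- B's digit loop: `for _ in range(k): out.append(chars[idx % 26]); idx //= 26`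
-- (digits collected least-significant first).
def emitDigits (idx : Int) : Nat → List Char
  | 0 => []
  | k + 1 =>
      ((PySem.Str.pyGet? "abcdefghijklmnopqrstuvwxyz" (PySem.Int.mod idx 26)).getD 'a')
        :: emitDigits (PySem.Int.floordiv idx 26) k

def gen_name_py_alt (n : Int) : String :=
  let m := n + 1
  if m ≤ 0 then "_"
  else
    let p := findLen m 1 26
    let idx := m - (p.2 - 26 ^ p.1) - 1
    "_" ++ String.ofList ((emitDigits idx p.1).reverse)

-- ===== PRECONDITION & SPEC =====
def Spec_gen_name_py (n : Int) (out : String) : Prop := out = gen_name_py_alt n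
instance (n : Int) (out : String) : Decidable (Spec_gen_name_py n out) := by unfold Spec_gen_name_py; infer_instance

-- ===== CLAIM (what is proved, stated in full; the proofs are below) =====
def Claim_equal_gen_name_py : Prop := ∀ (n : Int), Dom_gen_name_py n → Spec_gen_name_py n (gen_name_py n)

-- ===== LEMMAS AND PROOFS =====

-- Abstract recursive form of A's loop (proof-side helper only).
def bijStr (m : Int) : String :=
  if m ≤ 0 then ""
  else
    bijStr (PySem.Int.floordiv (m - 1) 26) ++
      ((PySem.Str.pyGet? "abcdefghijklmnopqrstuvwxyz" (PySem.Int.mod (m - 1) 26)).getD 'a').toString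
termination_by m.toNat
decreasing_by
  simp only [PySem.Int.floordiv_eq_ediv_of_pos (by omega : (0:Int) < 26)]
  omega

theorem genNameLoop_eq (n : Int) (r : String) : genNameLoop n r = bijStr n ++ r := by
  rw [genNameLoop, bijStr]
  by_cases h : 0 < n
  · simp only [if_pos h, if_neg (by omega : ¬ n ≤ 0)]
    rw [genNameLoop_eq]
    rw [String.append_assoc]
  · simp only [if_neg h, if_pos (by omega : n ≤ 0), String.empty_append]
termination_by n.toNat
decreasing_by
  simp only [PySem.Int.floordiv_eq_ediv_of_pos (by omega : (0:Int) < 26)]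
  omega

-- Cumulative block sizes: T L = 26 + 26^2 + … + 26^L.
def T : Nat → Int
  | 0 => 0
  | L + 1 => T L + 26 ^ (L + 1)

theorem T_mul (L : Nat) : 25 * T L = 26 ^ (L + 1) - 26 := by
  induction L with
  | zero => simp [T]
  | succ L ih =>
      have hp : (26:Int) ^ (L + 1 + 1) = 26 * 26 ^ (L + 1) := by ring
      simp only [T]
      linarith

theorem T_succ (L : Nat) : T (L + 1) = 26 * T L + 26 := by
  have h := T_mul L
  simp only [T]
  linarith

theorem findLen_spec (m : Int) (L : Nat) (h : T L < m) :
    ∃ L', findLen m (L + 1) (T (L + 1)) = (L' + 1, T (L' + 1)) ∧ T L' < m ∧ m ≤ T (L' + 1) := by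
  rw [findLen]
  by_cases h2 : T (L + 1) < m
  · rw [if_pos h2]
    have := findLen_spec m (L + 1) h2
    simpa only [T] using this
  · rw [if_neg h2]
    exact ⟨L, rfl, h, by omega⟩
termination_by (m - T (L + 1)).toNat
decreasing_by
  have h3 : (0:Int) < 26 ^ (L + 1 + 1) := by positivity
  have h4 : T (L + 1 + 1) = T (L + 1) + 26 ^ (L + 1 + 1) := rfl
  omega

theorem mk_append (a b : List Char) :
    String.ofList a ++ String.ofList b = String.ofList (a ++ b) := by
  apply String.toList_injective; simp

theorem one_char (c : Char) : c.toString = String.ofList [c] := by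
  apply String.toList_injective; simp

theorem bij_emit (L : Nat) : ∀ (m : Int), T L < m → m ≤ T (L + 1) →
    bijStr m = String.ofList ((emitDigits (m - T L - 1) (L + 1)).reverse) := by
  induction L with
  | zero =>
      intro m h1 h2
      simp only [T] at h1 h2
      norm_num at h1 h2
      rw [bijStr, if_neg (by omega : ¬ m ≤ 0)]
      have hd : PySem.Int.floordiv (m - 1) 26 = 0 := by
        rw [PySem.Int.floordiv_eq_ediv_of_pos (by omega : (0:Int) < 26)]; omega
      rw [hd, bijStr, if_pos le_rfl]
      have hT0 : m - T 0 - 1 = m - 1 := by simp [T]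
      rw [hT0]
      rw [show emitDigits (m - 1) (0 + 1) =
            [((PySem.Str.pyGet? "abcdefghijklmnopqrstuvwxyz"
                (PySem.Int.mod (m - 1) 26)).getD 'a')] from rfl]
      rw [String.empty_append, List.reverse_cons, List.reverse_nil, List.nil_append, one_char]
  | succ L ih =>
      intro m h1 h2
      have hTs : T (L + 1) = 26 * T L + 26 := T_succ L
      have hTss : T (L + 1 + 1) = 26 * T (L + 1) + 26 := T_succ (L + 1)
      rw [bijStr, if_neg (by omega : ¬ m ≤ 0)]
      have hq : PySem.Int.floordiv (m - 1) 26 = (m - 1) / 26 :=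
        PySem.Int.floordiv_eq_ediv_of_pos (by omega)
      have hr : PySem.Int.mod (m - 1) 26 = (m - 1) % 26 :=
        PySem.Int.mod_eq_emod_of_pos (by omega)
      rw [hq, hr]
      have hq1 : T L < (m - 1) / 26 := by omega
      have hq2 : (m - 1) / 26 ≤ T (L + 1) := by omega
      rw [ih ((m - 1) / 26) hq1 hq2]
      rw [show emitDigits (m - T (L + 1) - 1) (L + 1 + 1) =
            ((PySem.Str.pyGet? "abcdefghijklmnopqrstuvwxyz"
                (PySem.Int.mod (m - T (L + 1) - 1) 26)).getD 'a')
              :: emitDigits (PySem.Int.floordiv (m - T (L + 1) - 1) 26) (L + 1) from rfl]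
      have hd2 : PySem.Int.floordiv (m - T (L + 1) - 1) 26 = (m - 1) / 26 - T L - 1 := by
        rw [PySem.Int.floordiv_eq_ediv_of_pos (by omega : (0:Int) < 26)]; omega
      have hm2 : PySem.Int.mod (m - T (L + 1) - 1) 26 = (m - 1) % 26 := by
        rw [PySem.Int.mod_eq_emod_of_pos (by omega : (0:Int) < 26)]; omega
      rw [hd2, hm2, List.reverse_cons, one_char, mk_append]

-- ===== VERDICT (by name: the statement is the Claim_ definition above) =====
theorem gen_name_py_spec : Claim_equal_gen_name_py := by
  intro n _
  unfold Spec_gen_name_py gen_name_py gen_name_py_alt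
  rw [genNameLoop_eq]
  by_cases h : n + 1 ≤ 0
  · rw [if_pos h]
    rw [bijStr, if_pos h]
    rw [String.empty_append, String.append_empty]
  · rw [if_neg h]
    have h0 : T 0 < n + 1 := by simp [T]; omega
    obtain ⟨L', hfind, hlo, hhi⟩ := findLen_spec (n + 1) 0 h0
    have hT1 : T (0 + 1) = 26 := by norm_num [T]
    rw [hT1] at hfind
    norm_num at hfind
    simp only [hfind]
    have hpow : T (L' + 1) - 26 ^ (L' + 1) = T L' := by simp only [T]; ring
    simp only [hpow]
    rw [bij_emit L' (n + 1) hlo hhi]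
    rw [String.append_empty]
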